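-- pv_equiv track=rewrite | github.com/kvanwely/DIDO-LAB | FPKM_and_skip.py | fetch_cigar_exon
-- ===== SOURCE A (Python) =====
-- def fetch_cigar_exon(chrom, st, cigar):
-- 	''' fetch exon regions defined by cigar. st must be zero based return list of tuple of (chrom,st, end) '''
-- 	chrom_st = st
-- 	exon_bound = []
-- 	for c,s in cigar:	#code and size
-- 		if c==0:		#match
-- 			exon_bound.append((chrom, chrom_st,chrom_st + s))
-- 			chrom_st += s
-- 		elif c==1:		#insertion to ref
-- 			continue
-- 		elif c==2:		#deletion to ref
-- 			chrom_st += s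
-- 		elif c==3:		#gap or intron
-- 			chrom_st += s
-- 		elif c==4:		#soft clipping. We do NOT include soft clip as part of exon
-- 			chrom_st += s
-- 		else:
-- 			continue
-- 	return exon_bound
-- ===== SOURCE B (Python) =====
-- def fetch_cigar_exon(chrom, st, cigar):
--     ''' fetch exon regions defined by cigar. st must be zero based return list of tuple of (chrom,st, end) '''
--     # pass 1: prefix positions on the reference before each op
--     starts = [st]
--     for c, s in cigar:
--         starts.append(starts[-1] + (s if c in (0, 2, 3, 4) else 0))
--     # pass 2: keep only match ops, paired with their start position
--     return [(chrom, p, p + s) for (c, s), p in zip(cigar, starts) if c == 0]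
-- ===== Notes on version B (the rewrite author's own statement) =====
-- stated objective: alternative
-- what changed: Replaces A's single fused scan carrying a running position and an output accumulator by two passes: a prefix-sum pass computing the reference position before each op, then a comprehension selecting match ops and emitting their intervals.
import Mathlib
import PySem

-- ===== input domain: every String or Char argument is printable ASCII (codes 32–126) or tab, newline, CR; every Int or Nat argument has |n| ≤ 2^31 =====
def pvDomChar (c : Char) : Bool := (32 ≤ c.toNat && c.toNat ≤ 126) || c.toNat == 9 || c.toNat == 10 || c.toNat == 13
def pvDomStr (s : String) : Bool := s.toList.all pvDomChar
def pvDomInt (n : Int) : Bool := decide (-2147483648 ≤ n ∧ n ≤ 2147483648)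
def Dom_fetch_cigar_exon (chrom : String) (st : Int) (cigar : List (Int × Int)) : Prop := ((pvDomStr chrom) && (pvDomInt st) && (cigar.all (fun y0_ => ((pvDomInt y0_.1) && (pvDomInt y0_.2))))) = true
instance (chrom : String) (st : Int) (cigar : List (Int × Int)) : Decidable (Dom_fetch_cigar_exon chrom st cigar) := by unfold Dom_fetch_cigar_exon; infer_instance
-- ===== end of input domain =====

-- B replaces A's fused scan by a prefix-position pass followed by a match-selection pass; same output proved.
-- ===== PORT A =====
-- literal transliteration of A's loop: one fold carrying (chrom_st, exon_bound)
def fetch_cigar_exon (chrom : String) (st : Int) (cigar : List (Int × Int)) : List (String × Int × Int) :=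
  (cigar.foldl (fun (acc : Int × List (String × Int × Int)) cs =>
    if cs.1 = 0 then (acc.1 + cs.2, acc.2 ++ [(chrom, acc.1, acc.1 + cs.2)])
    else if cs.1 = 1 then acc
    else if cs.1 = 2 then (acc.1 + cs.2, acc.2)
    else if cs.1 = 3 then (acc.1 + cs.2, acc.2)
    else if cs.1 = 4 then (acc.1 + cs.2, acc.2)
    else acc) (st, [])).2

-- ===== PORT B =====
-- reference-consuming delta of one op:  s if c in (0, 2, 3, 4) else 0
def pvDelta (cs : Int × Int) : Int :=
  if cs.1 = 0 ∨ cs.1 = 2 ∨ cs.1 = 3 ∨ cs.1 = 4 then cs.2 else 0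

-- pass 1 of Source B: starts = [st]; for op: starts.append(starts[-1] + delta)
def pvStarts (st : Int) (cigar : List (Int × Int)) : List Int :=
  cigar.foldl (fun starts cs => starts ++ [starts.getLast! + pvDelta cs]) [st]

-- pass 2 of Source B: the zip/filter/map comprehension
def fetch_cigar_exon_alt (chrom : String) (st : Int) (cigar : List (Int × Int)) : List (String × Int × Int) :=
  ((cigar.zip (pvStarts st cigar)).filter (fun p => p.1.1 == 0)).map
    (fun p => (chrom, p.2, p.2 + p.1.2))

-- ===== PRECONDITION & SPEC =====
def Spec_fetch_cigar_exon (chrom : String) (st : Int) (cigar : List (Int × Int)) (out : List (String × Int × Int)) : Prop := out = fetch_cigar_exon_alt chrom st cigar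
instance (chrom : String) (st : Int) (cigar : List (Int × Int)) (out : List (String × Int × Int)) : Decidable (Spec_fetch_cigar_exon chrom st cigar out) := by unfold Spec_fetch_cigar_exon; infer_instance

-- ===== CLAIM (what is proved, stated in full; the proofs are below) =====
def Claim_equal_fetch_cigar_exon : Prop := ∀ (chrom : String) (st : Int) (cigar : List (Int × Int)), Dom_fetch_cigar_exon chrom st cigar → Spec_fetch_cigar_exon chrom st cigar (fetch_cigar_exon chrom st cigar)

-- ===== LEMMAS AND PROOFS =====

-- common recursive characterisation of both programs
def pvCore (chrom : String) (st : Int) : List (Int × Int) → List (String × Int × Int)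
  | [] => []
  | cs :: rest =>
      (if cs.1 = 0 then [(chrom, st, st + cs.2)] else []) ++ pvCore chrom (st + pvDelta cs) rest

lemma foldlA_snd (chrom : String) (cigar : List (Int × Int)) :
    ∀ (st : Int) (l : List (String × Int × Int)),
      (cigar.foldl (fun (acc : Int × List (String × Int × Int)) cs =>
        if cs.1 = 0 then (acc.1 + cs.2, acc.2 ++ [(chrom, acc.1, acc.1 + cs.2)])
        else if cs.1 = 1 then acc
        else if cs.1 = 2 then (acc.1 + cs.2, acc.2)
        else if cs.1 = 3 then (acc.1 + cs.2, acc.2)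
        else if cs.1 = 4 then (acc.1 + cs.2, acc.2)
        else acc) (st, l)).2 = l ++ pvCore chrom st cigar := by
  induction cigar with
  | nil => intro st l; simp [pvCore]
  | cons cs rest ih =>
      intro st l
      simp only [List.foldl_cons, pvCore]
      by_cases h0 : cs.1 = 0
      · simp [h0, ih, pvDelta]
      · by_cases h1 : cs.1 = 1
        · simp [h1, ih, pvDelta]
        · by_cases h2 : cs.1 = 2
          · simp [h2, ih, pvDelta]
          · by_cases h3 : cs.1 = 3
            · simp [h3, ih, pvDelta]
            · by_cases h4 : cs.1 = 4
              · simp [h4, ih, pvDelta]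
              · simp [h0, h1, h2, h3, h4, ih, pvDelta]

lemma fce_eq_core (chrom : String) (st : Int) (cigar : List (Int × Int)) :
    fetch_cigar_exon chrom st cigar = pvCore chrom st cigar := by
  simpa [fetch_cigar_exon] using foldlA_snd chrom cigar st []

lemma getLast!_append_right (pre l : List Int) (h : l ≠ []) :
    (pre ++ l).getLast! = l.getLast! := by
  rw [List.getLast!_eq_getLast?_getD, List.getLast!_eq_getLast?_getD,
    List.getLast?_append_of_ne_nil]
  exact h

lemma foldlS_shift (cigar : List (Int × Int)) :
    ∀ (pre l : List Int), l ≠ [] →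
      cigar.foldl (fun starts cs => starts ++ [starts.getLast! + pvDelta cs]) (pre ++ l)
        = pre ++ cigar.foldl (fun starts cs => starts ++ [starts.getLast! + pvDelta cs]) l := by
  induction cigar with
  | nil => intro pre l _; rfl
  | cons cs rest ih =>
      intro pre l hl
      simp only [List.foldl_cons]
      rw [getLast!_append_right pre l hl, List.append_assoc]
      exact ih pre (l ++ [l.getLast! + pvDelta cs]) (by simp)

lemma starts_cons (st : Int) (cs : Int × Int) (rest : List (Int × Int)) :
    pvStarts st (cs :: rest) = st :: pvStarts (st + pvDelta cs) rest := by
  unfold pvStarts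
  simp only [List.foldl_cons]
  have h1 : ([st] : List Int).getLast! = st := rfl
  rw [h1, foldlS_shift rest [st] [st + pvDelta cs] (by simp)]
  rfl

lemma alt_eq_core (chrom : String) (st : Int) (cigar : List (Int × Int)) :
    fetch_cigar_exon_alt chrom st cigar = pvCore chrom st cigar := by
  induction cigar generalizing st with
  | nil => rfl
  | cons cs rest ih =>
      unfold fetch_cigar_exon_alt at ih ⊢
      rw [starts_cons]
      by_cases h0 : cs.1 = 0
      · simp [pvCore, h0, ih, pvDelta]
      · simp [pvCore, h0, ih]

-- ===== VERDICT (by name: the statement is the Claim_ definition above) =====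
theorem fetch_cigar_exon_spec : Claim_equal_fetch_cigar_exon := by
  intro chrom st cigar _
  unfold Spec_fetch_cigar_exon
  exact (fce_eq_core chrom st cigar).trans (alt_eq_core chrom st cigar).symm
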